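-- pv_equiv track=rewrite | github.com/AverbakhMV/delion-orchestrator | orchestrator/cli.py | normalize_command_args
-- ===== SOURCE A (Python) =====
-- COMMAND_PREFIXES = {"\\deli", "/deli", "deli"}
--
-- def normalize_command_args(args: list[str]) -> list[str]:
--     first = args[0]
--     for prefix in COMMAND_PREFIXES:
--         if first == prefix:
--             return args[1:]
--         command_prefix = f"{prefix}:"
--         if first.startswith(command_prefix):
--             return [first[len(command_prefix) :], *args[1:]]
--     return args
-- ===== SOURCE B (Python) =====
-- def normalize_command_args(args: list[str]) -> list[str]:
--     first = args[0]
--     # the three command prefixes are exactly "deli" with an optional single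
--     # leading sigil '\' or '/': canonicalize the sigil away, then one comparison
--     core = first[1:] if first[:1] in ("\\", "/") else first
--     if core == "deli":
--         return args[1:]
--     if core.startswith("deli:"):
--         return [core[5:], *args[1:]]
--     return args
-- ===== Notes on version B (the rewrite author's own statement) =====
-- stated objective: alternative
-- what changed: B never consults the prefix set: it canonicalizes the first argument by stripping one optional leading sigil ('\' or '/') and then makes a single comparison against the core word 'deli' / 'deli:' prefix, replacing A's loop over the three prefixes with per-prefix equality/startswith tests.
import Mathlib
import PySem

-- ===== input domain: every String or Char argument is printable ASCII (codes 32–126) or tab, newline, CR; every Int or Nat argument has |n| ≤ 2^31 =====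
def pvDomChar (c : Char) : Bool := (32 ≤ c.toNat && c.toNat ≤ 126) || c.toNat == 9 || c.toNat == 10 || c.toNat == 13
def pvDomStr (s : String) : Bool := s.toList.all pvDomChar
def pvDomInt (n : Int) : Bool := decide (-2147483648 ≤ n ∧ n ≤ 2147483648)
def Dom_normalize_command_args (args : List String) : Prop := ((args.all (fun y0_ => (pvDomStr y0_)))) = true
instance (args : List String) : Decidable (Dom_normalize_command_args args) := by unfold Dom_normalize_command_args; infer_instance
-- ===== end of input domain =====

-- B strips one optional leading sigil ('\' or '/') from the first argument and compares the
-- remainder once against the core word "deli"/"deli:", instead of A's loop over the prefix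
-- set with per-prefix equality/startswith tests.


-- COMMAND_PREFIXES (a 3-element set of distinct literals; listed in source order)
def pvPrefixes : List String := ["\\deli", "/deli", "deli"]

-- ===== PORT A =====
-- the 'for prefix in COMMAND_PREFIXES' loop (iteration order is irrelevant: the prefixes are
-- pairwise distinct and none extends another, so at most one branch can fire)
def pvLoopA (first : String) (rest : List String) : List String → List String
  | [] => first :: rest
  | p :: ps =>
    if first = p then rest
    else
      let command_prefix := p ++ ":"
      if PySem.Str.startswith first command_prefix then
        PySem.Str.slice first (some (PySem.Str.len command_prefix)) none :: rest
      else pvLoopA first rest ps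

def normalize_command_args (args : List String) : List String :=
  match args with
  | [] => []   -- unreachable under Pre_: args[0] raises IndexError
  | first :: rest => pvLoopA first rest pvPrefixes

-- ===== PORT B =====
def normalize_command_args_alt (args : List String) : List String :=
  match args with
  | [] => []   -- unreachable under Pre_: args[0] raises IndexError
  | first :: rest =>
    -- core = first[1:] if first[:1] in ("\\", "/") else first
    let core :=
      if PySem.Str.slice first none (some 1) ∈ ["\\", "/"]
      then PySem.Str.slice first (some 1) none
      else first
    if core = "deli" then rest
    else if PySem.Str.startswith core "deli:" then
      PySem.Str.slice core (some 5) none :: rest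
    else first :: rest

-- ===== PRECONDITION & SPEC =====
-- Pre_ excludes only the empty list, on which A raises IndexError (args[0]).
def Pre_normalize_command_args (args : List String) : Prop := args ≠ []
instance (args : List String) : Decidable (Pre_normalize_command_args args) := by
  unfold Pre_normalize_command_args; infer_instance
def pvWitness_normalize_command_args : List String := ["deli:run", "x"]
def Spec_normalize_command_args (args : List String) (out : List String) : Prop := out = normalize_command_args_alt args
instance (args : List String) (out : List String) : Decidable (Spec_normalize_command_args args out) := by unfold Spec_normalize_command_args; infer_instance

-- ===== CLAIM (what is proved, stated in full; the proofs are below) =====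
def Claim_equal_normalize_command_args : Prop := ∀ (args : List String), Dom_normalize_command_args args → Pre_normalize_command_args args → Spec_normalize_command_args args (normalize_command_args args)

-- ===== LEMMAS AND PROOFS =====

-- slice s[n:] for nonnegative n is drop
lemma pvSliceDrop (s : String) (n : Int) (hn : 0 ≤ n) :
    PySem.Str.slice s (some n) none = String.ofList (s.toList.drop n.toNat) := by
  rw [← String.toList_inj]
  simp only [PySem.Str.slice, PySem.Chars.slice]
  rw [PySem.List.slice_from _ hn]

-- slice s[:1] is take 1
lemma pvSliceTake1 (s : String) :
    PySem.Str.slice s none (some 1) = String.ofList (s.toList.take 1) := by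
  rw [← String.toList_inj]
  simp only [PySem.Str.slice, PySem.Chars.slice]
  rw [PySem.List.slice_to _ (by norm_num : (0:Int) ≤ 1)]
  norm_num

-- startswith at the character-list level
lemma pvSW (s p : String) : PySem.Str.startswith s p = true ↔ p.toList <+: s.toList := by
  rw [PySem.Str.startswith_eq]; exact PySem.Chars.startswith_iff _ _

lemma pvOfListEq {l : List Char} {t : String} : String.ofList l = t ↔ l = t.toList := by
  rw [← String.toList_inj]; simp

-- the sigil case: first = c :: cs with c a stripped sigil ('\' or '/'); B reduces to the
-- same three-way decision on cs that the hypotheses state for A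
lemma pvSigilStep (first : String) (rest : List String) (c : Char) (cs : List Char)
    (hcs : first.toList = c :: cs)
    (hd : cs = ['d','e','l','i'] → normalize_command_args (first :: rest) = rest)
    (hp : ∀ u, cs = ['d','e','l','i',':'] ++ u →
        normalize_command_args (first :: rest) = String.ofList u :: rest)
    (hn : cs ≠ ['d','e','l','i'] → ¬ (['d','e','l','i',':'] <+: cs) →
        normalize_command_args (first :: rest) = first :: rest)
    (hsig : String.ofList [c] ∈ ["\\", "/"]) :
    normalize_command_args (first :: rest) = normalize_command_args_alt (first :: rest) := by
  simp only [normalize_command_args_alt]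
  rw [pvSliceTake1, hcs, show List.take 1 (c :: cs) = [c] from rfl, if_pos hsig]
  rw [pvSliceDrop first 1 (by norm_num), hcs,
      show List.drop (Int.toNat 1) (c :: cs) = cs from rfl]
  by_cases h1 : cs = ['d','e','l','i']
  · rw [if_pos (pvOfListEq.mpr (by rw [h1]; decide)), hd h1]
  · rw [if_neg (fun h => h1 (by have := pvOfListEq.mp h; rw [this]; decide))]
    by_cases h2 : ['d','e','l','i',':'] <+: cs
    · obtain ⟨u, hu⟩ := h2
      rw [if_pos (by rw [pvSW, show ("deli:" : String).toList = ['d','e','l','i',':'] from by decide]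
                     simpa using ⟨u, hu⟩)]
      rw [hp u hu.symm]
      rw [pvSliceDrop _ 5 (by norm_num)]
      congr 2
      rw [show (String.ofList cs).toList = cs from by simp, ← hu]
      rfl
    · rw [if_neg (by rw [pvSW, show ("deli:" : String).toList = ['d','e','l','i',':'] from by decide]
                     simpa using h2)]
      exact hn h1 h2

lemma pvCore (first : String) (rest : List String) :
    normalize_command_args (first :: rest) = normalize_command_args_alt (first :: rest) := by
  have tbs : ("\\deli" : String).toList = ['\\','d','e','l','i'] := by decide
  have tsl : ("/deli" : String).toList = ['/','d','e','l','i'] := by decide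
  have tdl : ("deli" : String).toList = ['d','e','l','i'] := by decide
  have tbsc : ("\\deli" ++ ":" : String).toList = ['\\','d','e','l','i',':'] := by decide
  have tslc : ("/deli" ++ ":" : String).toList = ['/','d','e','l','i',':'] := by decide
  have tdlc : ("deli" ++ ":" : String).toList = ['d','e','l','i',':'] := by decide
  cases hcs : first.toList with
  | nil =>
    have hf : first = "" := String.toList_inj.mp (by simp [hcs])
    subst hf; rfl
  | cons c cs =>
    -- reusable refutations of the A-side tests from the head character
    have mkne : ∀ (t : String) (d : Char) (ds : List Char), t.toList = d :: ds → c ≠ d →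
        first ≠ t := by
      intro t d ds ht hcd h
      rw [← String.toList_inj, hcs, ht] at h
      exact hcd (by injection h)
    have mksw : ∀ (p : String) (d : Char) (ds : List Char), p.toList = d :: ds → c ≠ d →
        ¬ PySem.Str.startswith first p = true := by
      intro p d ds hp hcd h
      rw [pvSW, hcs, hp, List.cons_prefix_cons] at h
      exact hcd h.1.symm
    by_cases hb : c = '\\'
    · subst hb
      refine pvSigilStep first rest _ cs hcs ?_ ?_ ?_ (by decide)
      · intro h1
        have heq : first = "\\deli" := String.toList_inj.mp (by rw [hcs, tbs, h1])
        simp only [normalize_command_args, pvPrefixes, pvLoopA]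
        rw [if_pos heq]
      · intro u hu
        have hne : first ≠ "\\deli" := by
          intro h; rw [← String.toList_inj, hcs, tbs] at h; simp [hu] at h
        have hsw : PySem.Str.startswith first ("\\deli" ++ ":") = true := by
          rw [pvSW, hcs, tbsc, hu]; exact ⟨u, rfl⟩
        simp only [normalize_command_args, pvPrefixes, pvLoopA]
        rw [if_neg hne, if_pos hsw]
        rw [show PySem.Str.len ("\\deli" ++ ":") = 6 from by decide,
            pvSliceDrop first 6 (by norm_num), hcs, hu]
        rfl
      · intro h1 h2
        have hne : first ≠ "\\deli" := by
          intro h; rw [← String.toList_inj, hcs, tbs] at h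
          exact h1 (by injection h)
        have hsw : ¬ PySem.Str.startswith first ("\\deli" ++ ":") = true := by
          rw [pvSW, hcs, tbsc, List.cons_prefix_cons]; rintro ⟨-, h⟩; exact h2 h
        simp only [normalize_command_args, pvPrefixes, pvLoopA]
        rw [if_neg hne, if_neg hsw, if_neg (mkne _ _ _ tsl (by decide)),
            if_neg (mksw _ _ _ tslc (by decide)), if_neg (mkne _ _ _ tdl (by decide)),
            if_neg (mksw _ _ _ tdlc (by decide))]
    · by_cases hsl : c = '/'
      · subst hsl
        refine pvSigilStep first rest _ cs hcs ?_ ?_ ?_ (by decide)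
        · intro h1
          have heq : first = "/deli" := String.toList_inj.mp (by rw [hcs, tsl, h1])
          simp only [normalize_command_args, pvPrefixes, pvLoopA]
          rw [if_neg (mkne _ _ _ tbs (by decide)), if_neg (mksw _ _ _ tbsc (by decide)),
              if_pos heq]
        · intro u hu
          have hne2 : first ≠ "/deli" := by
            intro h; rw [← String.toList_inj, hcs, tsl] at h; simp [hu] at h
          have hsw2 : PySem.Str.startswith first ("/deli" ++ ":") = true := by
            rw [pvSW, hcs, tslc, hu]; exact ⟨u, rfl⟩
          simp only [normalize_command_args, pvPrefixes, pvLoopA]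
          rw [if_neg (mkne _ _ _ tbs (by decide)), if_neg (mksw _ _ _ tbsc (by decide)),
              if_neg hne2, if_pos hsw2]
          rw [show PySem.Str.len ("/deli" ++ ":") = 6 from by decide,
              pvSliceDrop first 6 (by norm_num), hcs, hu]
          rfl
        · intro h1 h2
          have hne2 : first ≠ "/deli" := by
            intro h; rw [← String.toList_inj, hcs, tsl] at h
            exact h1 (by injection h)
          have hsw2 : ¬ PySem.Str.startswith first ("/deli" ++ ":") = true := by
            rw [pvSW, hcs, tslc, List.cons_prefix_cons]; rintro ⟨-, h⟩; exact h2 h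
          simp only [normalize_command_args, pvPrefixes, pvLoopA]
          rw [if_neg (mkne _ _ _ tbs (by decide)), if_neg (mksw _ _ _ tbsc (by decide)),
              if_neg hne2, if_neg hsw2, if_neg (mkne _ _ _ tdl (by decide)),
              if_neg (mksw _ _ _ tdlc (by decide))]
      · -- no sigil: core = first; both sides run the same "deli" tests
        have hnosig : ¬ (String.ofList [c] ∈ (["\\", "/"] : List String)) := by
          intro h
          rcases List.mem_cons.mp h with h | h
          · exact hb (by have := pvOfListEq.mp h; injection this)
          · rcases List.mem_cons.mp h with h | h
            · exact hsl (by have := pvOfListEq.mp h; injection this)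
            · simp at h
        simp only [normalize_command_args, normalize_command_args_alt, pvPrefixes, pvLoopA]
        rw [pvSliceTake1, hcs, show List.take 1 (c :: cs) = [c] from rfl, if_neg hnosig]
        rw [if_neg (mkne _ _ _ tbs hb), if_neg (mksw _ _ _ tbsc hb),
            if_neg (mkne _ _ _ tsl hsl), if_neg (mksw _ _ _ tslc hsl)]
        by_cases h3 : first = "deli"
        · rw [if_pos h3, if_pos h3]
        · rw [if_neg h3, if_neg h3]
          have hswi : (PySem.Str.startswith first ("deli" ++ ":") = true)
              ↔ (PySem.Str.startswith first "deli:" = true) := by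
            rw [pvSW, pvSW, tdlc, show ("deli:" : String).toList = ['d','e','l','i',':'] from by decide]
          by_cases h3s : PySem.Str.startswith first "deli:" = true
          · rw [if_pos (hswi.mpr h3s), if_pos h3s]
            rw [show PySem.Str.len ("deli" ++ ":") = 5 from by decide]
          · rw [if_neg (fun h => h3s (hswi.mp h)), if_neg h3s]


-- ===== VERDICT (by name: the statement is the Claim_ definition above) =====
theorem normalize_command_args_spec : Claim_equal_normalize_command_args := by
  intro args _ hpre
  cases args with
  | nil => exact absurd rfl hpre
  | cons first rest => exact pvCore first rest
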